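-- pv_equiv track=rewrite | github.com/Michael-Alz/cs5500-final-backend | app/services/surveys.py | determine_learning_style
-- ===== SOURCE A (Python) =====
-- from typing import Any, Dict, List, Optional
--
-- def determine_learning_style(total_scores: Dict[str, int]) -> Optional[str]:
--     """Return the category with the highest score, breaking ties deterministically."""
--     if not total_scores:
--         return None
--
--     best_category = None
--     best_score = None
--
--     for category, score in total_scores.items():
--         if (
--             best_score is None
--             or score > best_score
--             or (score == best_score and category < (best_category or category))
--         ):
--             best_category = category
--             best_score = score
--
--     return best_category
-- ===== SOURCE B (Python) =====
-- from typing import Any, Dict, List, Optional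
--
-- def determine_learning_style(total_scores: Dict[str, int]) -> Optional[str]:
--     """Return the category with the highest score, breaking ties alphabetically."""
--     if not total_scores:
--         return None
--     return sorted(total_scores.items(), key=lambda kv: (-kv[1], kv[0]))[0][0]
-- ===== Notes on version B (the rewrite author's own statement) =====
-- stated objective: idiomatic
-- what changed: Replaces the single-pass running-best scan with per-item None checks and a falsy-string tie-break by a sort on the key (-score, category) followed by taking the first element's key.
import Mathlib
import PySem

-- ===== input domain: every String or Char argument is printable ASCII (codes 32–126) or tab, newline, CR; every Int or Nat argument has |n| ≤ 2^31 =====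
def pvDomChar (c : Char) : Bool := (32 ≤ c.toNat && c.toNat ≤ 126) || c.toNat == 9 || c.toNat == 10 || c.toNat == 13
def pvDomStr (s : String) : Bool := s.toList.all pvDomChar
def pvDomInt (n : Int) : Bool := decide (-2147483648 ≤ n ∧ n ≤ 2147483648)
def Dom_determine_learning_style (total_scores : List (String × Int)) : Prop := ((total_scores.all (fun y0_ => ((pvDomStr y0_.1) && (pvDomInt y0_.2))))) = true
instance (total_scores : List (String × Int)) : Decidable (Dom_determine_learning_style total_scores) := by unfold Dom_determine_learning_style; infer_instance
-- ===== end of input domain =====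

-- B replaces A's running-best scan by the idiomatic sort on key (-score, category) and taking the first key; same cost class in practice, not claimed faster.


-- ===== PORT A =====
-- Python's `best_category or category` (None and "" are falsy) is ported literally.
def determine_learning_style (total_scores : List (String × Int)) : Option String :=
  if total_scores = [] then none
  else
    let st := total_scores.foldl
      (fun (acc : Option String × Option Int) kv =>
        let category := kv.1
        let score := kv.2
        match acc.2 with
        | none => (some category, some score)
        | some best_score =>
          if score > best_score ∨
             (score = best_score ∧
              category < (match acc.1 with
                          | none => category
                          | some c => if c = "" then category else c)) then
            (some category, some score)
          else acc)
      (none, none)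
    st.1

-- ===== PORT B =====
def determine_learning_style_alt (total_scores : List (String × Int)) : Option String :=
  if total_scores = [] then none
  else
    match PySem.List.sorted2 total_scores (fun kv => -kv.2) (fun kv => kv.1) with
    | [] => none
    | kv :: _ => some kv.1

-- ===== PRECONDITION & SPEC =====
-- Pre_ excludes lists with duplicate category keys: A's parameter is a Python dict, which cannot
-- hold duplicate keys, so any list-level behaviour of the ports on such inputs is accidental.
def Pre_determine_learning_style (total_scores : List (String × Int)) : Prop :=
  (total_scores.map Prod.fst).Nodup
instance (total_scores : List (String × Int)) : Decidable (Pre_determine_learning_style total_scores) := by unfold Pre_determine_learning_style; infer_instance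

def pvWitness_determine_learning_style : (List (String × Int)) := [("visual", 7), ("auditory", 7), ("kinesthetic", 3)]

def Spec_determine_learning_style (total_scores : List (String × Int)) (out : Option String) : Prop := out = determine_learning_style_alt total_scores
instance (total_scores : List (String × Int)) (out : Option String) : Decidable (Spec_determine_learning_style total_scores out) := by unfold Spec_determine_learning_style; infer_instance

-- ===== CLAIM (what is proved, stated in full; the proofs are below) =====
def Claim_equal_determine_learning_style : Prop := ∀ (total_scores : List (String × Int)), Dom_determine_learning_style total_scores → Pre_determine_learning_style total_scores → Spec_determine_learning_style total_scores (determine_learning_style total_scores)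

-- ===== LEMMAS AND PROOFS =====

-- the comparison sorted2 uses on the key (-score, category)
def pvBefore (x y : String × Int) : Bool :=
  decide (-x.2 < -y.2) || (!decide (-y.2 < -x.2) && decide (x.1 < y.1))

-- running "first minimum" step under pvBefore
def pvStep (h : Option (String × Int)) (x : String × Int) : Option (String × Int) :=
  match h with
  | none => some x
  | some y => if pvBefore x y then some x else some y

lemma head?_insertBy (x : String × Int) (ys : List (String × Int)) :
    (PySem.List.insertBy pvBefore x ys).head? =
      some (match ys with | [] => x | y :: _ => if pvBefore x y then x else y) := by
  cases ys with
  | nil => simp [PySem.List.insertBy]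
  | cons y t =>
    by_cases h : pvBefore x y <;> simp [PySem.List.insertBy, h]

lemma head?_foldl_insertBy (xs ys : List (String × Int)) :
    (xs.foldl (fun acc x => PySem.List.insertBy pvBefore x acc) ys).head? =
      xs.foldl pvStep ys.head? := by
  induction xs generalizing ys with
  | nil => rfl
  | cons x t ih =>
    simp only [List.foldl_cons]
    rw [ih]
    congr 1
    rw [head?_insertBy]
    cases ys with
    | nil => rfl
    | cons y t' => by_cases h : pvBefore x y <;> simp [pvStep, h]

lemma not_string_lt_empty (s : String) : ¬ s < "" := by
  intro h
  have h' := String.lt_iff_toList_lt.mp h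
  simp at h'

lemma cond_iff_pvBefore (category c : String) (score s : Int) :
    (score > s ∨ (score = s ∧ category < (if c = "" then category else c))) ↔
      pvBefore (category, score) (c, s) = true := by
  simp only [pvBefore, Bool.or_eq_true, Bool.and_eq_true, Bool.not_eq_true',
    decide_eq_true_eq, decide_eq_false_iff_not]
  constructor
  · rintro (h1 | ⟨h2, h3⟩)
    · left; omega
    · by_cases hc : c = ""
      · exact absurd (hc ▸ h3) (by simp)
      · right; exact ⟨by omega, by simpa [hc] using h3⟩
  · rintro (h1 | ⟨h2, h3⟩)
    · left; omega
    · by_cases hgt : score > s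
      · left; exact hgt
      · have hs : score = s := by omega
        by_cases hc : c = ""
        · exact absurd (hc ▸ h3) (not_string_lt_empty _)
        · right; exact ⟨hs, by simp [hc, h3]⟩

-- A's loop, started from a some-state, tracks the pvStep running minimum
lemma loopA_eq_pvStep (xs : List (String × Int)) :
    ∀ (c : String) (s : Int) (m : String × Int),
    xs.foldl pvStep (some (c, s)) = some m →
    xs.foldl
      (fun (acc : Option String × Option Int) kv =>
        let category := kv.1
        let score := kv.2
        match acc.2 with
        | none => (some category, some score)
        | some best_score =>
          if score > best_score ∨
             (score = best_score ∧
              category < (match acc.1 with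
                          | none => category
                          | some c => if c = "" then category else c)) then
            (some category, some score)
          else acc)
      (some c, some s)
    = (some m.1, some m.2) := by
  induction xs with
  | nil =>
    intro c s m hm
    simp only [List.foldl_nil] at hm ⊢
    cases hm
    rfl
  | cons kv t ih =>
    intro c s m hm
    obtain ⟨category, score⟩ := kv
    simp only [List.foldl_cons, pvStep] at hm ⊢
    by_cases hb : pvBefore (category, score) (c, s)
    · rw [if_pos ((cond_iff_pvBefore category c score s).mpr hb)]
      rw [if_pos hb] at hm
      exact ih _ _ _ hm
    · rw [if_neg (fun hx => hb ((cond_iff_pvBefore category c score s).mp hx))]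
      rw [if_neg hb] at hm
      exact ih _ _ _ hm

lemma foldl_pvStep_some (xs : List (String × Int)) (p : String × Int) :
    ∃ m, xs.foldl pvStep (some p) = some m := by
  induction xs generalizing p with
  | nil => exact ⟨p, rfl⟩
  | cons x t ih =>
    simp only [List.foldl_cons, pvStep]
    by_cases h : pvBefore x p <;> simp only [h, Bool.false_eq_true, if_pos, if_neg, not_false_iff] <;> exact ih _

-- ===== VERDICT (by name: the statement is the Claim_ definition above) =====
theorem determine_learning_style_spec : Claim_equal_determine_learning_style := by
  intro ts _hdom _hpre
  unfold Spec_determine_learning_style determine_learning_style determine_learning_style_alt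
  cases ts with
  | nil => rfl
  | cons kv t =>
    obtain ⟨c, s⟩ := kv
    simp only [reduceCtorEq, if_neg, not_false_iff]
    have hsorted :
        PySem.List.sorted2 ((c, s) :: t) (fun kv => -kv.2) (fun kv => kv.1)
          = ((c, s) :: t).foldl (fun acc x => PySem.List.insertBy pvBefore x acc) [] := rfl
    rw [hsorted]
    obtain ⟨m, hm⟩ := foldl_pvStep_some t (c, s)
    have hfold : (((c, s) :: t).foldl pvStep (List.head? [])) = some m := by
      simp only [List.head?, List.foldl_cons, pvStep]
      exact hm
    have hhead := head?_foldl_insertBy ((c, s) :: t) []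
    rw [hfold] at hhead
    -- left side: A's loop
    have hA := loopA_eq_pvStep t c s m hm
    simp only [List.foldl_cons]
    rw [hA]
    simp only [List.foldl_cons] at hhead ⊢
    cases hlist : t.foldl (fun acc x => PySem.List.insertBy pvBefore x acc) (PySem.List.insertBy pvBefore (c, s) []) with
    | nil => rw [hlist] at hhead; simp at hhead
    | cons w ws =>
      rw [hlist] at hhead
      simp only [List.head?, Option.some.injEq] at hhead
      simp [hhead]
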